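-- pv_equiv track=rewrite | github.com/shakedk/my-transit-life | Code for generating routes - multipolyline.py | longestSub
-- ===== SOURCE A (Python) =====
-- def longestSub(arr_of_coords):
--     max_len = 0
--     max_len_idx = 0
--     for i in range (0, len(arr_of_coords)):
--         if len(arr_of_coords[i]) > max_len:
--             max_len = len(arr_of_coords[i])
--             max_len_idx = i
--     return arr_of_coords[max_len_idx]
-- ===== SOURCE B (Python) =====
-- def longestSub(arr_of_coords):
--     # Stable descending sort by length; first element is the first sub-array
--     # of maximal length (same first-wins tie-break as a strict-> max scan).
--     return sorted(arr_of_coords, key=len, reverse=True)[0]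
-- ===== Notes on version B (the rewrite author's own statement) =====
-- stated objective: alternative
-- what changed: Replaced the index-tracking linear max-scan with a stable reverse-sorted-by-length list whose first element is taken; reverse=True stability preserves A's first-wins tie-break.
import Mathlib
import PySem

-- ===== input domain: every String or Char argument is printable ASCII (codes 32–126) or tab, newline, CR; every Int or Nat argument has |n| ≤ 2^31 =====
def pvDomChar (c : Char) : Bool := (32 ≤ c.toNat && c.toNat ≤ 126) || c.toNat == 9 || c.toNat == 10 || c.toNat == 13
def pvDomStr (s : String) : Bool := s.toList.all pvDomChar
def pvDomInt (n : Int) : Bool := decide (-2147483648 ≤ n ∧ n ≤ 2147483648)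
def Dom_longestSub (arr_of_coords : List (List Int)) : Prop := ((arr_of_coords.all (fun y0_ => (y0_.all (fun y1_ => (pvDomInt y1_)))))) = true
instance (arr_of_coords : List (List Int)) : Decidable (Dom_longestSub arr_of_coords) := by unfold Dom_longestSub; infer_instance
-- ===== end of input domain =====

-- B replaces A's index-tracking linear max-scan by a stable reverse sort on length
-- followed by taking the first element (alternative decomposition, same values).


-- ===== PORT A =====
def longestSub (arr_of_coords : List (List Int)) : List Int :=
  let st := (PySem.List.pyRange 0 (PySem.List.len arr_of_coords)).foldl
    (fun (s : Int × Int) i =>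
      if PySem.List.len (PySem.List.pyGetD arr_of_coords i []) > s.1 then
        (PySem.List.len (PySem.List.pyGetD arr_of_coords i []), i)
      else s) (0, 0)
  (PySem.List.pyGet? arr_of_coords st.2).getD []

-- ===== PORT B =====
def longestSub_alt (arr_of_coords : List (List Int)) : List Int :=
  (PySem.List.pyGet? (PySem.List.sorted arr_of_coords (fun l => PySem.List.len l) true) 0).getD []

-- ===== PRECONDITION & SPEC =====
-- Pre_ excludes exactly the empty list, on which Python A (and B) raise IndexError.
def Pre_longestSub (arr_of_coords : List (List Int)) : Prop := arr_of_coords ≠ []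
instance (arr_of_coords : List (List Int)) : Decidable (Pre_longestSub arr_of_coords) := by unfold Pre_longestSub; infer_instance
def pvWitness_longestSub : List (List Int) := [[1, 2], [3, 4, 5], [6]]
def Spec_longestSub (arr_of_coords : List (List Int)) (out : List Int) : Prop := out = longestSub_alt arr_of_coords
instance (arr_of_coords : List (List Int)) (out : List Int) : Decidable (Spec_longestSub arr_of_coords out) := by unfold Spec_longestSub; infer_instance

-- ===== CLAIM (what is proved, stated in full; the proofs are below) =====
def Claim_equal_longestSub : Prop := ∀ (arr_of_coords : List (List Int)), Dom_longestSub arr_of_coords → Pre_longestSub arr_of_coords → Spec_longestSub arr_of_coords (longestSub arr_of_coords)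

-- ===== LEMMAS AND PROOFS =====

-- A's loop body, on (index, element) pairs.
def stepA (s : Int × Int) (p : Int × List Int) : Int × Int :=
  if PySem.List.len p.2 > s.1 then (PySem.List.len p.2, p.1) else s

lemma stA_eq (arr : List (List Int)) :
    (PySem.List.pyRange 0 (PySem.List.len arr)).foldl
      (fun (s : Int × Int) i =>
        if PySem.List.len (PySem.List.pyGetD arr i []) > s.1 then
          (PySem.List.len (PySem.List.pyGetD arr i []), i)
        else s) (0, 0)
    = (PySem.List.enumerate arr).foldl stepA (0, 0) := by
  rw [PySem.List.enumerate_eq_map_pyRange arr [], List.foldl_map]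
  rfl

lemma inv (arr : List (List Int)) (h : arr ≠ []) :
    ∃ (k : Nat) (m : List Int) (t : List (List Int)),
      (PySem.List.enumerate arr).foldl stepA (0, 0) = (PySem.List.len m, (k : Int)) ∧
      k < arr.length ∧ arr[k]? = some m ∧
      PySem.List.sorted arr (fun l => PySem.List.len l) true = m :: t := by
  induction arr using List.reverseRecOn with
  | nil => exact absurd rfl h
  | append_singleton ys x ih =>
    rcases eq_or_ne ys [] with hys | hys
    · subst hys
      refine ⟨0, x, [], ?_, by simp, by simp, ?_⟩
      · simp only [List.nil_append, PySem.List.enumerate, List.foldl, stepA]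
        have hx : 0 ≤ PySem.List.len x := by
          simp [PySem.List.len]
        split_ifs with hgt
        · rfl
        · simp only [not_lt] at hgt
          have hz : PySem.List.len x = 0 := le_antisymm hgt hx
          simp only [PySem.List.len, Nat.cast_eq_zero] at hz
          simp [hz]
      · rw [PySem.List.sorted_rev_eq_foldl_insertBy]
        simp [PySem.List.insertBy]
    · obtain ⟨k, m, t, hst, hk, hget, hsort⟩ := ih hys
      have henum : PySem.List.enumerate (ys ++ [x]) =
          PySem.List.enumerate ys ++ [((ys.length : Int), x)] := by
        rw [PySem.List.enumerate_append]
        simp [PySem.List.enumerate]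
      have hsort' : PySem.List.sorted (ys ++ [x]) (fun l => PySem.List.len l) true =
          PySem.List.insertBy (fun a b => decide (PySem.List.len b < PySem.List.len a)) x
            (PySem.List.sorted ys (fun l => PySem.List.len l) true) := by
        rw [PySem.List.sorted_rev_eq_foldl_insertBy, PySem.List.sorted_rev_eq_foldl_insertBy,
          List.foldl_append]
        rfl
      rw [henum, List.foldl_append]
      simp only [List.foldl, hst]
      rw [hsort'] at *
      rw [hsort]
      by_cases hgt : PySem.List.len m < PySem.List.len x
      · have hgtN : m.length < x.length := by simpa [PySem.List.len] using hgt
        refine ⟨ys.length, x, m :: t, ?_, by simp, by simp, ?_⟩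
        · show stepA (PySem.List.len m, (k : Int)) ((ys.length : Int), x) =
            (PySem.List.len x, (ys.length : Int))
          unfold stepA
          rw [if_pos hgt]
        · simp [PySem.List.insertBy, hgtN]
      · have hleN : ¬ m.length < x.length := by simpa [PySem.List.len] using hgt
        refine ⟨k, m, PySem.List.insertBy (fun a b => decide (PySem.List.len b < PySem.List.len a)) x t, ?_, by simp; omega, ?_, ?_⟩
        · show stepA (PySem.List.len m, (k : Int)) ((ys.length : Int), x) =
            (PySem.List.len m, (k : Int))
          unfold stepA
          rw [if_neg hgt]
        · rw [List.getElem?_append_left hk]; exact hget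
        · simp [PySem.List.insertBy, hleN]

-- ===== VERDICT (by name: the statement is the Claim_ definition above) =====
theorem longestSub_spec : Claim_equal_longestSub := by
  intro arr _ hpre
  unfold Spec_longestSub longestSub longestSub_alt
  obtain ⟨k, m, t, hst, hk, hget, hsort⟩ := inv arr hpre
  rw [stA_eq, hst, hsort]
  show (PySem.List.pyGet? arr ((k : Nat) : Int)).getD [] =
    (PySem.List.pyGet? (m :: t) ((0 : Nat) : Int)).getD []
  rw [PySem.List.pyGet?_natCast, PySem.List.pyGet?_natCast]
  simp [hget]
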